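-- pv_equiv track=rewrite | github.com/lisihao/FlashMLX | experiments/dual_instance_h0/edge_am_experiment.py | quality_str
-- ===== SOURCE A (Python) =====
-- def quality_str(baseline, generated):
--     match = sum(1 for a, b in zip(baseline, generated) if a == b)
--     total = min(len(baseline), len(generated))
--     exact = baseline == generated
--     fd = next((i for i, (a, b) in enumerate(zip(baseline, generated)) if a != b),
--               min(len(baseline), len(generated)))
--     if exact:
--         return f"EXACT ({total} tok)"
--     else:
--         return f"{match:>3}/{total} (div@{fd})"
-- ===== SOURCE B (Python) =====
-- def quality_str(baseline, generated):
--     total = min(len(baseline), len(generated))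
--     # phase 1: walk the longest common prefix; its length is also the divergence index
--     fd = 0
--     while fd < total and baseline[fd] == generated[fd]:
--         fd += 1
--     # exact iff the common prefix covers both sequences entirely
--     if fd == len(baseline) == len(generated):
--         return f"EXACT ({total} tok)"
--     # phase 2: every prefix position matched; count the stray matches after the divergence
--     match = fd + sum(a == b for a, b in zip(baseline[fd + 1:], generated[fd + 1:]))
--     return f"{match:>3}/{total} (div@{fd})"
-- ===== Notes on version B (the rewrite author's own statement) =====
-- stated objective: alternative
-- what changed: B is a two-phase algorithm: phase 1 walks the longest common prefix (its length is simultaneously the divergence index, and covering both full sequences decides exactness with an early return); phase 2 only counts matches among the zipped suffixes after that point, so A's three full scans (match comprehension over the whole zip, list ==, next() divergence search) are replaced by one bounded prefix walk plus one suffix count.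
import Mathlib
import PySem

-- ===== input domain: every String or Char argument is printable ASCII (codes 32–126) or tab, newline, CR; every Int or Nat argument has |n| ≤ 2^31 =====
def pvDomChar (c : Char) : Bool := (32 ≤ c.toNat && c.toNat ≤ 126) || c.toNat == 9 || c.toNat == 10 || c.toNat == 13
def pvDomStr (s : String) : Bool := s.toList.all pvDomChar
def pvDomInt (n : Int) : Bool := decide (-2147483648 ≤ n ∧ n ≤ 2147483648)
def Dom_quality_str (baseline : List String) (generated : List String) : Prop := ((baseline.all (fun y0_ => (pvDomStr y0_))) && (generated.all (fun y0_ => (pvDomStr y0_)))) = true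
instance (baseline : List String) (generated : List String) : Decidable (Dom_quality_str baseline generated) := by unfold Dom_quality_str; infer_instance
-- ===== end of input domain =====

-- B replaces A's three full scans (match comprehension, list ==, next() divergence search) by a
-- two-phase algorithm: walk the longest common prefix (its length is the divergence index and,
-- covering both sequences, decides exactness), then count matches only in the zipped suffixes.

-- the two f-strings, shared verbatim by both ports
def pvFmtExact (total : Int) : String :=
  "EXACT (" ++ PySem.Int.toStr total ++ " tok)"
def pvFmtDiv (matc : Int) (total : Int) (fd : Int) : String :=
  -- f"{match:>3}": right-align in width 3 with spaces
  (String.ofList (List.replicate (3 - (PySem.Int.toStr matc).toList.length) ' ') ++ PySem.Int.toStr matc)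
    ++ "/" ++ PySem.Int.toStr total ++ " (div@" ++ PySem.Int.toStr fd ++ ")"

-- ===== PORT A =====
def quality_str (baseline : List String) (generated : List String) : String :=
  let matc : Int := (((baseline.zip generated).countP (fun p => p.1 == p.2) : Nat) : Int)
  let total : Int := min (baseline.length : Int) (generated.length : Int)
  let exact : Bool := baseline == generated
  let fd : Int :=
    (((PySem.List.enumerate (baseline.zip generated)).find? (fun p => !(p.2.1 == p.2.2))).map (·.1)).getD
      (min (baseline.length : Int) (generated.length : Int))
  if exact then pvFmtExact total else pvFmtDiv matc total fd

-- ===== PORT B =====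
-- phase 1: 'while fd < total and baseline[fd] == generated[fd]: fd += 1'
def pvLcpLoop (baseline : List String) (generated : List String) (total : Nat) (fd : Nat) : Nat :=
  if fd < total then
    if PySem.List.pyGet? baseline (fd : Int) == PySem.List.pyGet? generated (fd : Int) then
      pvLcpLoop baseline generated total (fd + 1)
    else fd
  else fd
termination_by total - fd

def quality_str_alt (baseline : List String) (generated : List String) : String :=
  let total : Nat := min baseline.length generated.length
  let fd : Nat := pvLcpLoop baseline generated total 0
  if fd == baseline.length && fd == generated.length then
    pvFmtExact (total : Int)
  else
    -- phase 2: fd + sum(a == b for a, b in zip(baseline[fd+1:], generated[fd+1:]))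
    let matc : Int := (fd : Int) +
      ((((PySem.List.slice baseline (some ((fd : Int) + 1)) none).zip
          (PySem.List.slice generated (some ((fd : Int) + 1)) none)).countP (fun p => p.1 == p.2) : Nat) : Int)
    pvFmtDiv matc (total : Int) (fd : Int)

-- ===== PRECONDITION & SPEC =====
def Spec_quality_str (baseline : List String) (generated : List String) (out : String) : Prop := out = quality_str_alt baseline generated
instance (baseline : List String) (generated : List String) (out : String) : Decidable (Spec_quality_str baseline generated out) := by unfold Spec_quality_str; infer_instance

-- ===== CLAIM (what is proved, stated in full; the proofs are below) =====
def Claim_equal_quality_str : Prop := ∀ (baseline : List String) (generated : List String), Dom_quality_str baseline generated → Spec_quality_str baseline generated (quality_str baseline generated)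

-- ===== LEMMAS AND PROOFS =====

-- A's next(...) scan returns start + length of the matching prefix
theorem pv_find_eq_takeWhile (L : List (String × String)) :
    ∀ (k : Int),
      ((((PySem.List.enumerate L k).find? (fun p => !(p.2.1 == p.2.2))).map (·.1)).getD
          (k + (L.length : Int)))
        = k + ((L.takeWhile (fun p => p.1 == p.2)).length : Int) := by
  induction L with
  | nil => intro k; simp [PySem.List.enumerate_nil]
  | cons a t ih =>
    intro k
    rw [PySem.List.enumerate_cons]
    by_cases h : (a.1 == a.2) = true
    · rw [List.find?_cons_of_neg (by simp [h]),
        List.takeWhile_cons_of_pos (p := fun q : String × String => q.1 == q.2) h]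
      simp only [List.length_cons]
      push_cast
      rw [show k + ((t.length : Int) + 1) = (k + 1) + (t.length : Int) from by ring, ih (k + 1)]
      ring
    · rw [List.find?_cons_of_pos (by simp [h]), List.takeWhile_cons_of_neg (p := fun q : String × String => q.1 == q.2) (by simp [h])]
      simp

theorem pv_drop_takeWhile (L : List (String × String)) (p : (String × String) → Bool) :
    L.drop (L.takeWhile p).length = L.dropWhile p := by
  induction L with
  | nil => simp
  | cons a t ih => by_cases h : p a <;> simp [h, ih]

-- B's phase-1 loop computes fd + length of the matching prefix of the remaining pairs
theorem pv_lcp_loop_eq (b g : List String) :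
    ∀ (fd : Nat), fd ≤ min b.length g.length →
      pvLcpLoop b g (min b.length g.length) fd
        = fd + (((b.zip g).drop fd).takeWhile (fun p => p.1 == p.2)).length := by
  intro fd
  induction hfuel : min b.length g.length - fd using Nat.strong_induction_on generalizing fd with
  | _ n ih =>
    intro hle
    rw [pvLcpLoop]
    by_cases hlt : fd < min b.length g.length
    · have hb : fd < b.length := by omega
      have hg : fd < g.length := by omega
      have hz : fd < (b.zip g).length := by simp [List.length_zip]; omega
      rw [if_pos hlt, PySem.List.pyGet?_natCast, PySem.List.pyGet?_natCast,
        List.getElem?_eq_getElem hb, List.getElem?_eq_getElem hg]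
      rw [List.drop_eq_getElem_cons hz, List.getElem_zip]
      by_cases h : (b[fd] == g[fd]) = true
      · rw [if_pos (by simpa using h),
          List.takeWhile_cons_of_pos (p := fun q : String × String => q.1 == q.2) h,
          ih (min b.length g.length - (fd + 1)) (by omega) (fd + 1) rfl (by omega)]
        simp only [List.length_cons]; omega
      · rw [if_neg (by simpa using h),
          List.takeWhile_cons_of_neg (p := fun q : String × String => q.1 == q.2) (by simpa using h)]
        simp
    · have : fd = min b.length g.length := by omega
      subst this
      rw [if_neg hlt]
      have : ((b.zip g).drop (min b.length g.length)) = [] := by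
        apply List.drop_eq_nil_of_le; simp [List.length_zip]
      simp [this]

-- the head of dropWhile fails the predicate
theorem pv_dropWhile_head_false (L t : List (String × String)) (a : String × String)
    (p : (String × String) → Bool) (h : L.dropWhile p = a :: t) : p a = false := by
  induction L with
  | nil => simp at h
  | cons x u ih =>
    rw [List.dropWhile_cons] at h
    by_cases hx : p x
    · simp [hx] at h; exact ih h
    · simp [hx] at h; simpa [h.1] using hx

-- total match count = prefix length + match count after the divergence position
theorem pv_count_split (L : List (String × String)) :
    L.countP (fun p => p.1 == p.2)
      = (L.takeWhile (fun p => p.1 == p.2)).length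
        + (L.drop ((L.takeWhile (fun p => p.1 == p.2)).length + 1)).countP (fun p => p.1 == p.2) := by
  set p : (String × String) → Bool := fun p => p.1 == p.2 with hp
  conv_lhs => rw [← List.takeWhile_append_dropWhile (p := p) (l := L)]
  rw [List.countP_append]
  have h1 : (L.takeWhile p).countP p = (L.takeWhile p).length := by
    rw [List.countP_eq_length]
    intro a ha; exact List.mem_takeWhile_imp ha
  have h2 : L.drop ((L.takeWhile p).length + 1) = (L.dropWhile p).tail := by
    rw [← List.drop_drop (i := 1), pv_drop_takeWhile, List.drop_one]
  rw [h1, h2]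
  congr 1
  cases hdw : L.dropWhile p with
  | nil => simp
  | cons a t =>
    have ha : p a = false := pv_dropWhile_head_false L t a p hdw
    simp [ha]

-- zipping dropped suffixes = dropping from the zip
theorem pv_zip_drop (b g : List String) (k : Nat) :
    (b.drop k).zip (g.drop k) = (b.zip g).drop k := by
  induction b generalizing g k with
  | nil => simp
  | cons x t ih =>
    cases g with
    | nil => simp
    | cons y u =>
      cases k with
      | zero => simp
      | succ k => simpa using ih u k

-- exactness ≡ the common prefix covers both sequences entirely
theorem pv_exact_iff (b g : List String) :
    b = g ↔ (((b.zip g).takeWhile (fun p => p.1 == p.2)).length = b.length ∧ b.length = g.length) := by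
  induction b generalizing g with
  | nil => cases g <;> simp
  | cons a t ih =>
    cases g with
    | nil => simp
    | cons c u =>
      by_cases h : a = c
      · subst h
        rw [List.zip_cons_cons, List.takeWhile_cons_of_pos (p := fun q : String × String => q.1 == q.2) (by simp)]
        simp only [List.length_cons]
        constructor
        · intro he
          injection he with _ h2
          subst h2
          exact ⟨by rw [((ih t).mp rfl).1], rfl⟩
        · rintro ⟨h1, h2⟩
          have := (ih u).mpr ⟨by omega, by omega⟩
          rw [this]
      · have hb : (a == c) = false := by simpa using h
        rw [List.zip_cons_cons, List.takeWhile_cons_of_neg (p := fun q : String × String => q.1 == q.2) (by simp [hb])]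
        simp only [List.length_nil, List.length_cons]
        constructor
        · intro he; exact absurd (by injection he) h
        · rintro ⟨h1, _⟩; omega

-- ===== VERDICT (by name: the statement is the Claim_ definition above) =====
theorem quality_str_spec : Claim_equal_quality_str := by
  intro b g _
  unfold Spec_quality_str quality_str quality_str_alt
  have hzlen : (b.zip g).length = min b.length g.length := by simp [List.length_zip]
  have hfdB : pvLcpLoop b g (min b.length g.length) 0
      = ((b.zip g).takeWhile (fun p => p.1 == p.2)).length := by
    simpa using pv_lcp_loop_eq b g 0 (Nat.zero_le _)
  have hfdA : ((((PySem.List.enumerate (b.zip g)).find? (fun p => !(p.2.1 == p.2.2))).map (·.1)).getD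
      (min (b.length : Int) (g.length : Int)))
      = ((((b.zip g).takeWhile (fun p => p.1 == p.2)).length : Nat) : Int) := by
    have h0 := pv_find_eq_takeWhile (b.zip g) 0
    simp only [zero_add] at h0
    rw [show (min (b.length : Int) (g.length : Int)) = (((b.zip g).length : Nat) : Int) from by
      rw [hzlen]; push_cast; rfl]
    exact h0
  set F : Nat := ((b.zip g).takeWhile (fun p => p.1 == p.2)).length with hF
  have hex : (b == g) = ((F == b.length) && (F == g.length)) := by
    by_cases he : b = g
    · obtain ⟨h1, h2⟩ := (pv_exact_iff b g).mp he
      rw [← hF] at h1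
      simp [he, h1, ← h2]
    · have hno : ¬ (F = b.length ∧ b.length = g.length) := by
        rintro ⟨h1, h2⟩
        exact he ((pv_exact_iff b g).mpr ⟨by rw [← hF]; exact h1, h2⟩)
      by_cases h1 : F = b.length
      · have h2 : F ≠ g.length := by
          intro h2; exact hno ⟨h1, by omega⟩
        have hL : (b == g) = false := by simpa using he
        have hR : (F == g.length) = false := by simpa using h2
        rw [hL, hR, Bool.and_false]
      · have hL : (b == g) = false := by simpa using he
        have hR : (F == b.length) = false := by simpa using h1
        rw [hL, hR, Bool.false_and]
  dsimp only
  rw [hfdB, hfdA, hex]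
  by_cases hc : ((F == b.length) && (F == g.length)) = true
  · rw [if_pos hc, if_pos hc]
    congr 1
    push_cast; rfl
  · rw [if_neg hc, if_neg hc]
    have hmin : min (b.length : Int) (g.length : Int) = ((min b.length g.length : Nat) : Int) := by
      push_cast; rfl
    have hslice : ∀ (xs : List String),
        PySem.List.slice xs (some ((F : Int) + 1)) none = xs.drop (F + 1) := by
      intro xs
      rw [show ((F : Int) + 1) = (((F + 1 : Nat) : Int)) from by push_cast; ring,
        PySem.List.slice_from_natCast]
    rw [hslice b, hslice g, pv_zip_drop, hmin]
    congr 1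
    rw [hF, pv_count_split (b.zip g)]
    push_cast
    ring
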